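-- pv_equiv track=rewrite | github.com/anirudhchoudary/aoc2024 | Day5/d5.py | fix_update_sequence
-- ===== SOURCE A (Python) =====
-- def check_update_sequence(update, rules):
--     for i in range(len(update)):
--         for j in range(i + 1, len(update)):
--             if (update[i], update[j]) not in rules:
--                 return False
--     return True
--
-- def is_correct_order(update, rules):
--     for i in range(len(update)):
--         for j in range(i + 1, len(update)):
--             if (update[j], update[i]) in rules:
--                 return False
--     return True
--
-- def fix_update_sequence(update, rules):
--     update = update[:]
--     n = len(update)
--     for i in range(n):
--         for j in range(i + 1, n):
--             if (update[j], update[i]) in rules: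
--                 update[i], update[j] = update[j], update[i]
--
--     if check_update_sequence(update, rules) and is_correct_order(update, rules):
--         return update
--     else:
--         return None
-- ===== SOURCE B (Python) =====
-- # B: insertion sort driven by the rule relation (with rules hashed into a set),
-- # then one combined pairwise validation pass; returns the order or None.
-- def fix_update_sequence(update, rules):
--     ruleset = set(rules)
--     result = []
--     for x in update:
--         i = next((j for j, y in enumerate(result) if (x, y) in ruleset), len(result))
--         result.insert(i, x)
--     rest = result
--     while rest:
--         a, rest = rest[0], rest[1:]
--         for b in rest:
--             if (a, b) not in ruleset or (b, a) in ruleset: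
--                 return None
--     return result
-- ===== Notes on version B (the rewrite author's own statement) =====
-- stated objective: alternative
-- what changed: The hand-rolled O(n^2) index-swap pass is replaced by rule-driven insertion sort over a growing list, the two separate validation helpers are fused into one combined pairwise pass, and rule membership is hashed into a set built once.
import Mathlib
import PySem

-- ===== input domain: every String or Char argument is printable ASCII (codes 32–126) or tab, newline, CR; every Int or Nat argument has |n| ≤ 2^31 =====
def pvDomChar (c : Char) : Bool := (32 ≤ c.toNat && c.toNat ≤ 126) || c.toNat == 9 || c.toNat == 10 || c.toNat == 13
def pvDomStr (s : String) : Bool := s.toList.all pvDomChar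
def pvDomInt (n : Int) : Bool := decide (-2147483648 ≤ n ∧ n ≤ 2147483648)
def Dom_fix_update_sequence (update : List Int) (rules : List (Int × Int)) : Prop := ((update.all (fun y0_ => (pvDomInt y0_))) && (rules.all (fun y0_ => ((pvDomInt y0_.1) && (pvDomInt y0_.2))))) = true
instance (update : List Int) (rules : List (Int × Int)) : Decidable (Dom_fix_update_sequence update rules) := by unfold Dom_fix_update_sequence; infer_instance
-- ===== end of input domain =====

-- B differs from A in structure only: insertion sort instead of the index-swap pass; same return value.

-- ===== PORT A =====
-- helper of A: check_update_sequence (all earlier-later pairs are rules)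
def check_update_sequence (update : List Int) (rules : List (Int × Int)) : Bool :=
  (PySem.List.pyRange 0 (update.length : Int) 1).all (fun i =>
    (PySem.List.pyRange (i + 1) (update.length : Int) 1).all (fun j =>
      decide ((PySem.List.pyGetD update i 0, PySem.List.pyGetD update j 0) ∈ rules)))

-- helper of A: is_correct_order (no later-earlier pair is a rule)
def is_correct_order (update : List Int) (rules : List (Int × Int)) : Bool :=
  (PySem.List.pyRange 0 (update.length : Int) 1).all (fun i =>
    (PySem.List.pyRange (i + 1) (update.length : Int) 1).all (fun j =>
      !decide ((PySem.List.pyGetD update j 0, PySem.List.pyGetD update i 0) ∈ rules)))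

-- the double swap loop; indices produced by pyRange are always in range, so pyGetD/pySetD are exact here
def fix_update_sequence (update : List Int) (rules : List (Int × Int)) : Option (List Int) :=
  let n : Int := update.length
  let u := (PySem.List.pyRange 0 n 1).foldl (fun u i =>
    (PySem.List.pyRange (i + 1) n 1).foldl (fun u j =>
      let a := PySem.List.pyGetD u j 0
      let b := PySem.List.pyGetD u i 0
      if (a, b) ∈ rules then
        PySem.List.pySetD (PySem.List.pySetD u i a) j b
      else u) u) update
  if check_update_sequence u rules && is_correct_order u rules then some u else none

-- ===== PORT B =====
-- B helper: insert x before the first y with (x,y) in the rule set (else at the end)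
def pvInsB (rs : PySem.Set (Int × Int)) (res : List Int) (x : Int) : List Int :=
  let i := res.findIdx (fun y => PySem.Set.contains rs (x, y))
  PySem.List.insert res (i : Int) x

-- B helper: the head/tail validation loop ('while rest: a, rest = rest[0], rest[1:]; …')
def pvValidB (rs : PySem.Set (Int × Int)) : List Int → Bool
  | [] => true
  | a :: rest =>
      rest.all (fun b => PySem.Set.contains rs (a, b) && !PySem.Set.contains rs (b, a)) &&
      pvValidB rs rest

def fix_update_sequence_alt (update : List Int) (rules : List (Int × Int)) : Option (List Int) :=
  let rs : PySem.Set (Int × Int) := PySem.Set.ofList rules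
  let result := update.foldl (fun res x => pvInsB rs res x) []
  if pvValidB rs result then some result else none

-- ===== PRECONDITION & SPEC =====
def Spec_fix_update_sequence (update : List Int) (rules : List (Int × Int)) (out : Option (List Int)) : Prop := out = fix_update_sequence_alt update rules
instance (update : List Int) (rules : List (Int × Int)) (out : Option (List Int)) : Decidable (Spec_fix_update_sequence update rules out) := by unfold Spec_fix_update_sequence; infer_instance

-- ===== CLAIM (what is proved, stated in full; the proofs are below) =====
def Claim_equal_fix_update_sequence : Prop := ∀ (update : List Int) (rules : List (Int × Int)), Dom_fix_update_sequence update rules → Spec_fix_update_sequence update rules (fix_update_sequence update rules)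

-- ===== LEMMAS AND PROOFS =====

-- the strict order induced by the rules: (a,b) is a rule and (b,a) is not
def pvS (rules : List (Int × Int)) (a b : Int) : Prop := (a, b) ∈ rules ∧ (b, a) ∉ rules

theorem pvS_asymm {rules : List (Int × Int)} {a b : Int} (h1 : pvS rules a b) (h2 : pvS rules b a) : False :=
  h1.2 h2.1

theorem pvS_irrefl {rules : List (Int × Int)} {a : Int} (h : pvS rules a a) : False := h.2 h.1

-- indexing/setting at the join of an append
theorem pvGetD_mid (pre ys : List Int) (y : Int) :
    PySem.List.pyGetD (pre ++ y :: ys) (pre.length : Int) 0 = y := by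
  simp [PySem.List.pyGetD_natCast, List.getD_eq_getElem?_getD]

theorem pvSet_mid (pre ys : List Int) (y v : Int) :
    (pre ++ y :: ys).set pre.length v = pre ++ v :: ys := by
  rw [List.set_append]; simp

-- A's inner pass, reformulated structurally: thread the current minimum through the tail
def pvGo (rules : List (Int × Int)) (m : Int) : List Int → Int × List Int
  | [] => (m, [])
  | x :: xs =>
      if (x, m) ∈ rules then
        let p := pvGo rules x xs; (p.1, m :: p.2)
      else
        let p := pvGo rules m xs; (p.1, x :: p.2)

theorem pvGo_length (rules : List (Int × Int)) (m : Int) (t : List Int) :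
    (pvGo rules m t).2.length = t.length := by
  induction t generalizing m with
  | nil => rfl
  | cons x xs ih => simp only [pvGo]; split <;> simp [ih]

def pvSelSort (rules : List (Int × Int)) : List Int → List Int
  | [] => []
  | m :: t => (pvGo rules m t).1 :: pvSelSort rules (pvGo rules m t).2
termination_by l => l.length
decreasing_by simp [pvGo_length]

theorem pvGo_perm (rules : List (Int × Int)) (m : Int) (t : List Int) :
    ((pvGo rules m t).1 :: (pvGo rules m t).2).Perm (m :: t) := by
  induction t generalizing m with
  | nil => simp [pvGo]
  | cons x xs ih =>
      simp only [pvGo]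
      split
      · exact (List.Perm.swap _ _ _).trans ((ih x).cons m)
      · exact ((List.Perm.swap _ _ _).trans ((ih m).cons x)).trans (List.Perm.swap _ _ _)

theorem pvSelSort_perm (rules : List (Int × Int)) (u : List Int) :
    (pvSelSort rules u).Perm u := by
  induction u using pvSelSort.induct rules with
  | case1 => simp [pvSelSort]
  | case2 m t ih =>
      rw [pvSelSort]
      exact (ih.cons _).trans (pvGo_perm rules m t)

-- the swap step of A's double loop (i is the outer index)
def pvStep (rules : List (Int × Int)) (i : Int) (u : List Int) (j : Int) : List Int :=
  let a := PySem.List.pyGetD u j 0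
  let b := PySem.List.pyGetD u i 0
  if (a, b) ∈ rules then
    PySem.List.pySetD (PySem.List.pySetD u i a) j b
  else u

theorem pvInner (rules : List (Int × Int)) (rest : List Int) : ∀ (mid pre : List Int) (m : Int),
    (PySem.List.pyRange ((pre.length + 1 + mid.length : Nat) : Int)
        ((pre.length + 1 + mid.length + rest.length : Nat) : Int) 1).foldl
      (pvStep rules (pre.length : Int)) (pre ++ m :: (mid ++ rest))
    = pre ++ (pvGo rules m rest).1 :: (mid ++ (pvGo rules m rest).2) := by
  induction rest with
  | nil =>
      intro mid pre m
      rw [PySem.List.pyRange_one_eq_nil (by simp)]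
      simp [pvGo]
  | cons x rest ih =>
      intro mid pre m
      rw [PySem.List.pyRange_one_cons (by simp), List.foldl_cons]
      have hassoc : pre ++ m :: (mid ++ x :: rest) = (pre ++ m :: mid) ++ x :: rest := by simp
      have hstep : pvStep rules (pre.length : Int) (pre ++ m :: (mid ++ x :: rest))
          ((pre.length + 1 + mid.length : Nat) : Int) =
          if (x, m) ∈ rules then pre ++ x :: ((mid ++ [m]) ++ rest)
          else pre ++ m :: ((mid ++ [x]) ++ rest) := by
        have hlen : ((pre.length + 1 + mid.length : Nat) : Int) = ((pre ++ m :: mid).length : Int) := by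
          simp; omega
        have ha : PySem.List.pyGetD (pre ++ m :: (mid ++ x :: rest))
            ((pre.length + 1 + mid.length : Nat) : Int) 0 = x := by
          rw [hlen, hassoc]; exact pvGetD_mid _ _ _
        have hb : PySem.List.pyGetD (pre ++ m :: (mid ++ x :: rest)) ((pre.length : Nat) : Int) 0 = m :=
          pvGetD_mid _ _ _
        unfold pvStep
        rw [ha, hb]
        by_cases hc : (x, m) ∈ rules
        · rw [if_pos hc, if_pos hc]
          have h1 : PySem.List.pySetD (pre ++ m :: (mid ++ x :: rest)) ((pre.length : Nat) : Int) x
              = pre ++ x :: (mid ++ x :: rest) := by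
            rw [PySem.List.pySetD_natCast]; exact pvSet_mid pre (mid ++ x :: rest) m x
          rw [h1, hlen]
          have hlen2 : ((pre ++ m :: mid).length : Int) = ((pre ++ x :: mid).length : Int) := by simp
          rw [hlen2, PySem.List.pySetD_natCast]
          have h2 : pre ++ x :: (mid ++ x :: rest) = (pre ++ x :: mid) ++ x :: rest := by simp
          rw [h2, pvSet_mid]
          simp
        · rw [if_neg hc, if_neg hc]
          simp
      rw [hstep]
      by_cases hc : (x, m) ∈ rules
      · rw [if_pos hc]
        rw [show ((pre.length + 1 + mid.length : Nat) : Int) + 1 = ((pre.length + 1 + (mid ++ [m]).length : Nat) : Int) from by simp; omega,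
            show ((pre.length + 1 + mid.length + (x :: rest).length : Nat) : Int) = ((pre.length + 1 + (mid ++ [m]).length + rest.length : Nat) : Int) from by simp; omega,
            ih (mid ++ [m]) pre x]
        simp only [pvGo, if_pos hc]
        simp
      · rw [if_neg hc]
        rw [show ((pre.length + 1 + mid.length : Nat) : Int) + 1 = ((pre.length + 1 + (mid ++ [x]).length : Nat) : Int) from by simp; omega,
            show ((pre.length + 1 + mid.length + (x :: rest).length : Nat) : Int) = ((pre.length + 1 + (mid ++ [x]).length + rest.length : Nat) : Int) from by simp; omega,
            ih (mid ++ [x]) pre m]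
        simp only [pvGo, if_neg hc]
        simp

theorem pvOuter (rules : List (Int × Int)) (n : Int) (k : Nat) :
    ∀ (u pre : List Int), u.length = k → n = pre.length + u.length →
    (PySem.List.pyRange (pre.length : Int) n 1).foldl
      (fun s i => (PySem.List.pyRange (i + 1) n 1).foldl (pvStep rules i) s) (pre ++ u)
    = pre ++ pvSelSort rules u := by
  induction k with
  | zero =>
      intro u pre hlen hn
      rw [List.eq_nil_of_length_eq_zero hlen] at hn ⊢
      rw [PySem.List.pyRange_one_eq_nil (by simp at hn; omega)]
      simp [pvSelSort]
  | succ k ih =>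
      intro u pre hlen hn
      cases u with
      | nil => simp at hlen
      | cons m t =>
        simp only [List.length_cons] at hlen hn
        rw [PySem.List.pyRange_one_cons (by omega), List.foldl_cons]
        have hin := pvInner rules t ([] : List Int) pre m
        simp only [List.length_nil, List.nil_append] at hin
        have h1 : (pre.length : Int) + 1 = ((pre.length + 1 + 0 : Nat) : Int) := by simp
        have h2 : n = ((pre.length + 1 + 0 + t.length : Nat) : Int) := by push_cast; omega
        rw [h1, h2, hin]
        have hs1 : pre ++ (pvGo rules m t).1 :: (pvGo rules m t).2
            = (pre ++ [(pvGo rules m t).1]) ++ (pvGo rules m t).2 := by simp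
        have h3 : ((pre.length + 1 + 0 + t.length : Nat) : Int)
            = ((pre ++ [(pvGo rules m t).1]).length : Int) + (pvGo rules m t).2.length := by
          simp [pvGo_length]
        have h4 : ((pre.length + 1 + 0 : Nat) : Int) = ((pre ++ [(pvGo rules m t).1]).length : Int) := by
          simp
        rw [hs1, h4, ← h2]
        rw [ih (pvGo rules m t).2 (pre ++ [(pvGo rules m t).1]) (by rw [pvGo_length]; omega)
          (by rw [h2]; exact_mod_cast h3)]
        rw [pvSelSort]
        simp

theorem pvLoopA_eq_selSort (update : List Int) (rules : List (Int × Int)) :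
    (PySem.List.pyRange 0 (update.length : Int) 1).foldl (fun u i =>
      (PySem.List.pyRange (i + 1) (update.length : Int) 1).foldl (fun u j =>
        let a := PySem.List.pyGetD u j 0
        let b := PySem.List.pyGetD u i 0
        if (a, b) ∈ rules then
          PySem.List.pySetD (PySem.List.pySetD u i a) j b
        else u) u) update = pvSelSort rules update := by
  have h := pvOuter rules (update.length : Int) update.length update [] rfl (by simp)
  simpa [pvStep] using h

-- A's two validation helpers together decide Pairwise (pvS rules)
theorem pvCheckA_iff (u : List Int) (rules : List (Int × Int)) :
    (check_update_sequence u rules && is_correct_order u rules) = true ↔ u.Pairwise (pvS rules) := by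
  rw [List.pairwise_iff_getElem]
  simp only [check_update_sequence, is_correct_order, Bool.and_eq_true, List.all_eq_true,
    PySem.List.mem_pyRange_one, Bool.not_eq_eq_eq_not, Bool.not_true, decide_eq_true_eq,
    decide_eq_false_iff_not]
  constructor
  · rintro ⟨h1, h2⟩ i j hi hj hij
    have hbi : (0:Int) ≤ (i:Int) ∧ (i:Int) < (u.length:Int) := by omega
    have hbj : (i:Int) + 1 ≤ (j:Int) ∧ (j:Int) < (u.length:Int) := by omega
    have e1 := h1 (i:Int) hbi (j:Int) hbj
    have e2 := h2 (i:Int) hbi (j:Int) hbj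
    rw [PySem.List.pyGetD_eq_getElem u 0 (by omega) (by exact_mod_cast hi),
        PySem.List.pyGetD_eq_getElem u 0 (by omega) (by exact_mod_cast hj)] at e1
    rw [PySem.List.pyGetD_eq_getElem u 0 (by omega) (by exact_mod_cast hj),
        PySem.List.pyGetD_eq_getElem u 0 (by omega) (by exact_mod_cast hi)] at e2
    simp only [Int.toNat_natCast] at e1 e2
    exact ⟨e1, e2⟩
  · intro h
    constructor
    · rintro i ⟨hi0, hin⟩ j ⟨hj1, hjn⟩
      rw [PySem.List.pyGetD_eq_getElem u 0 hi0 hin, PySem.List.pyGetD_eq_getElem u 0 (by omega) hjn]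
      exact (h i.toNat j.toNat (by omega) (by omega) (by omega)).1
    · rintro i ⟨hi0, hin⟩ j ⟨hj1, hjn⟩
      rw [PySem.List.pyGetD_eq_getElem u 0 hi0 hin, PySem.List.pyGetD_eq_getElem u 0 (by omega) hjn]
      exact (h i.toNat j.toNat (by omega) (by omega) (by omega)).2


-- B's validation loop decides Pairwise (pvS rules)
theorem pvValidB_iff (rules : List (Int × Int)) (l : List Int) :
    pvValidB (PySem.Set.ofList rules) l = true ↔ l.Pairwise (pvS rules) := by
  induction l with
  | nil => simp [pvValidB]
  | cons a rest ih =>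
      simp only [pvValidB, Bool.and_eq_true, List.all_eq_true, List.pairwise_cons, ih,
        Bool.not_eq_eq_eq_not, Bool.not_true, PySem.Set.contains_eq_listContains,
        List.contains_eq_mem, PySem.Set.mem_ofList, decide_eq_true_eq, decide_eq_false_iff_not,
        pvS]

-- B's insertion, recursively
def pvInsRec (rules : List (Int × Int)) (x : Int) : List Int → List Int
  | [] => [x]
  | y :: t => if (x, y) ∈ rules then x :: y :: t else y :: pvInsRec rules x t

theorem pvInsB_eq_rec (rules : List (Int × Int)) (res : List Int) (x : Int) :
    pvInsB (PySem.Set.ofList rules) res x = pvInsRec rules x res := by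
  unfold pvInsB
  rw [PySem.List.insert_natCast res _ x List.findIdx_le_length]
  simp only [PySem.Set.contains_eq_listContains, List.contains_eq_mem, PySem.Set.mem_ofList]
  induction res with
  | nil => rfl
  | cons y t ih =>
      simp only [pvInsRec, List.findIdx_cons]
      by_cases h : (x, y) ∈ rules
      · simp [h]
      · simp [h, ih]

theorem pvInsRec_perm (rules : List (Int × Int)) (x : Int) (t : List Int) :
    (pvInsRec rules x t).Perm (x :: t) := by
  induction t with
  | nil => rfl
  | cons y t ih =>
      simp only [pvInsRec]
      split
      · rfl
      · exact (ih.cons y).trans (List.Perm.swap _ _ _)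

theorem pvFoldIns_perm (rules : List (Int × Int)) (l : List Int) : ∀ (acc : List Int),
    (l.foldl (fun res x => pvInsRec rules x res) acc).Perm (l ++ acc) := by
  induction l with
  | nil => intro acc; simp
  | cons x l ih =>
      intro acc
      simp only [List.foldl_cons]
      exact (ih _).trans (((pvInsRec_perm rules x acc).append_left l).trans List.perm_middle)

-- linearity of pvS on the members of a valid arrangement l₀
theorem pvTotal (rules : List (Int × Int)) (l : List Int) (hp : l.Pairwise (pvS rules)) :
    ∀ a ∈ l, ∀ b ∈ l, a ≠ b → pvS rules a b ∨ pvS rules b a := by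
  induction hp with
  | nil => simp
  | @cons c t hc _ ih =>
      intro a ha b hb hne
      rcases List.mem_cons.mp ha with rfl | ha' <;> rcases List.mem_cons.mp hb with rfl | hb' <;>
        first
          | exact absurd rfl hne
          | exact Or.inl (hc _ hb')
          | exact Or.inr (hc _ ha')
          | exact ih _ ha' _ hb' hne

theorem pvTrans (rules : List (Int × Int)) (l : List Int) (hp : l.Pairwise (pvS rules)) :
    ∀ a ∈ l, ∀ b ∈ l, ∀ c ∈ l, pvS rules a b → pvS rules b c → pvS rules a c := by
  induction hp with
  | nil => simp
  | @cons h t hh _ ih =>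
      intro a ha b hb c hc hab hbc
      rcases List.mem_cons.mp ha with rfl | ha' <;> rcases List.mem_cons.mp hb with rfl | hb' <;>
        rcases List.mem_cons.mp hc with rfl | hc' <;>
        first
          | exact (pvS_irrefl hab).elim
          | exact (pvS_irrefl hbc).elim
          | exact (pvS_asymm hab hbc).elim
          | exact hh _ hc'
          | exact (pvS_asymm hab (hh _ ha')).elim
          | exact (pvS_asymm hbc (hh _ hb')).elim
          | exact ih _ ha' _ hb' _ hc' hab hbc

theorem pvNodup (rules : List (Int × Int)) (l : List Int) (hp : l.Pairwise (pvS rules)) :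
    l.Nodup := by
  exact hp.imp (fun h => by rintro rfl; exact pvS_irrefl h)

-- under linearity, pvGo returns the minimum
theorem pvGo_min (rules : List (Int × Int)) (E : Int → Prop)
    (htot : ∀ a b, E a → E b → a ≠ b → pvS rules a b ∨ pvS rules b a)
    (htr : ∀ a b c, E a → E b → E c → pvS rules a b → pvS rules b c → pvS rules a c)
    (t : List Int) : ∀ (m : Int), (∀ x ∈ m :: t, E x) → (m :: t).Nodup →
    ∀ x ∈ (pvGo rules m t).2, pvS rules (pvGo rules m t).1 x := by
  induction t with
  | nil => intro m _ _ x hx; simp [pvGo] at hx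
  | cons x xs ih =>
      intro m hE hnd y hy
      have hxm : x ≠ m := by
        intro h; subst h
        simp [List.nodup_cons] at hnd
      have hEm : E m := hE m (by simp)
      have hEx : E x := hE x (by simp)
      by_cases h : (x, m) ∈ rules
      · have hS : pvS rules x m := by
          rcases htot x m hEx hEm hxm with hS | hS
          · exact hS
          · exact absurd h hS.2
        have hE' : ∀ z ∈ x :: xs, E z := by
          intro z hz; exact hE z (by simp [List.mem_cons] at hz ⊢; tauto)
        have hnd' : (x :: xs).Nodup := hnd.of_cons
        have ihx := ih x hE' hnd'
        have hrm : pvS rules (pvGo rules x xs).1 m := by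
          have hr : (pvGo rules x xs).1 ∈ x :: xs := (pvGo_perm rules x xs).mem_iff.mp (by simp)
          have hxr : x = (pvGo rules x xs).1 ∨ x ∈ (pvGo rules x xs).2 := by
            have := (pvGo_perm rules x xs).mem_iff.mpr (show x ∈ x :: xs by simp)
            simpa [List.mem_cons] using this
          rcases hxr with hxr | hxr
          · rw [← hxr]; exact hS
          · have h1 : pvS rules (pvGo rules x xs).1 x := ihx x hxr
            have hEr : E (pvGo rules x xs).1 := hE' _ hr
            exact htr _ _ _ hEr hEx hEm h1 hS
        simp only [pvGo, if_pos h] at hy ⊢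
        rcases List.mem_cons.mp hy with rfl | hy'
        · exact hrm
        · exact ihx y hy'
      · have hS : pvS rules m x := by
          rcases htot x m hEx hEm hxm with hS | hS
          · exact absurd hS.1 h
          · exact hS
        have hE' : ∀ z ∈ m :: xs, E z := by
          intro z hz; exact hE z (by simp [List.mem_cons] at hz ⊢; tauto)
        have hnd' : (m :: xs).Nodup := by
          simp only [List.nodup_cons, List.mem_cons] at hnd ⊢
          tauto
        have ihm := ih m hE' hnd'
        have hrx : pvS rules (pvGo rules m xs).1 x := by
          have hr : (pvGo rules m xs).1 ∈ m :: xs := (pvGo_perm rules m xs).mem_iff.mp (by simp)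
          have hmr : m = (pvGo rules m xs).1 ∨ m ∈ (pvGo rules m xs).2 := by
            have := (pvGo_perm rules m xs).mem_iff.mpr (show m ∈ m :: xs by simp)
            simpa [List.mem_cons] using this
          rcases hmr with hmr | hmr
          · rw [← hmr]; exact hS
          · have h1 : pvS rules (pvGo rules m xs).1 m := ihm m hmr
            have hEr : E (pvGo rules m xs).1 := hE' _ hr
            exact htr _ _ _ hEr hEm hEx h1 hS
        simp only [pvGo, if_neg h] at hy ⊢
        rcases List.mem_cons.mp hy with rfl | hy'
        · exact hrx
        · exact ihm y hy'

theorem pvSelSort_pairwise (rules : List (Int × Int)) (E : Int → Prop)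
    (htot : ∀ a b, E a → E b → a ≠ b → pvS rules a b ∨ pvS rules b a)
    (htr : ∀ a b c, E a → E b → E c → pvS rules a b → pvS rules b c → pvS rules a c)
    (u : List Int) : (∀ x ∈ u, E x) → u.Nodup →
    (pvSelSort rules u).Pairwise (pvS rules) := by
  induction u using pvSelSort.induct rules with
  | case1 => intro _ _; simp [pvSelSort]
  | case2 m t ih =>
      intro hE hnd
      rw [pvSelSort]
      have hperm := pvGo_perm rules m t
      refine List.Pairwise.cons ?_ ?_
      · intro y hy
        have hy2 : y ∈ (pvGo rules m t).2 := (pvSelSort_perm rules _).mem_iff.mp hy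
        exact pvGo_min rules E htot htr t m hE hnd y hy2
      · refine ih ?_ ?_
        · intro z hz
          exact hE z (hperm.mem_iff.mp (by simp [hz]))
        · exact (hperm.nodup_iff.mpr hnd).of_cons

theorem pvInsRec_pairwise (rules : List (Int × Int)) (E : Int → Prop)
    (htot : ∀ a b, E a → E b → a ≠ b → pvS rules a b ∨ pvS rules b a)
    (htr : ∀ a b c, E a → E b → E c → pvS rules a b → pvS rules b c → pvS rules a c)
    (x : Int) (t : List Int) : (∀ y ∈ x :: t, E y) → (x :: t).Nodup →
    t.Pairwise (pvS rules) → (pvInsRec rules x t).Pairwise (pvS rules) := by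
  induction t with
  | nil => intro _ _ _; simp [pvInsRec]
  | cons y t ih =>
      intro hE hnd hp
      have hxy : x ≠ y := by
        intro h; subst h
        simp [List.nodup_cons] at hnd
      have hEx : E x := hE x (by simp)
      have hEy : E y := hE y (by simp)
      rw [List.pairwise_cons] at hp
      simp only [pvInsRec]
      by_cases h : (x, y) ∈ rules
      · have hS : pvS rules x y := by
          rcases htot x y hEx hEy hxy with hS | hS
          · exact hS
          · exact absurd h hS.2
        rw [if_pos h]
        refine List.Pairwise.cons ?_ (List.Pairwise.cons hp.1 hp.2)
        intro z hz
        rcases List.mem_cons.mp hz with rfl | hz'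
        · exact hS
        · exact htr _ _ _ hEx hEy (hE z (by simp [hz'])) hS (hp.1 z hz')
      · have hS : pvS rules y x := by
          rcases htot x y hEx hEy hxy with hS | hS
          · exact absurd hS.1 h
          · exact hS
        rw [if_neg h]
        refine List.Pairwise.cons ?_ ?_
        · intro z hz
          have : z = x ∨ z ∈ t := by
            have := (pvInsRec_perm rules x t).mem_iff.mp hz
            simpa [List.mem_cons] using this
          rcases this with rfl | hz'
          · exact hS
          · exact hp.1 z hz'
        · refine ih ?_ ?_ hp.2
          · intro z hz
            exact hE z (by simp [List.mem_cons] at hz ⊢; tauto)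
          · simp only [List.nodup_cons, List.mem_cons] at hnd ⊢
            tauto

theorem pvFoldIns_pairwise (rules : List (Int × Int)) (E : Int → Prop)
    (htot : ∀ a b, E a → E b → a ≠ b → pvS rules a b ∨ pvS rules b a)
    (htr : ∀ a b c, E a → E b → E c → pvS rules a b → pvS rules b c → pvS rules a c)
    (l : List Int) : ∀ (acc : List Int), (∀ y ∈ l ++ acc, E y) → (l ++ acc).Nodup →
    acc.Pairwise (pvS rules) →
    (l.foldl (fun res x => pvInsRec rules x res) acc).Pairwise (pvS rules) := by
  induction l with
  | nil => intro acc _ _ hp; simpa using hp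
  | cons x l ih =>
      intro acc hE hnd hp
      simp only [List.foldl_cons]
      have hpermIns := pvInsRec_perm rules x acc
      have hpm : (l ++ pvInsRec rules x acc).Perm (x :: (l ++ acc)) :=
        (hpermIns.append_left l).trans List.perm_middle
      refine ih (pvInsRec rules x acc) ?_ ?_ ?_
      · intro y hy
        have : y ∈ x :: (l ++ acc) := hpm.mem_iff.mp hy
        exact hE y (by simpa using this)
      · refine hpm.nodup_iff.mpr ?_
        have : ((x :: l) ++ acc).Perm (x :: (l ++ acc)) := by simp
        exact this.nodup_iff.mp hnd
      · refine pvInsRec_pairwise rules E htot htr x acc ?_ ?_ hp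
        · intro y hy
          rcases List.mem_cons.mp hy with rfl | hy'
          · exact hE y (by simp)
          · exact hE y (by simp [hy'])
        · have h1 : (x :: (l ++ acc)).Nodup := by
            have hp0 : ((x :: l) ++ acc).Perm (x :: (l ++ acc)) := by simp
            exact hp0.nodup_iff.mp hnd
          rw [List.nodup_cons] at h1 ⊢
          exact ⟨fun hx => h1.1 (by simp [hx]), List.Nodup.of_append_right h1.2⟩

-- a permutation that is pairwise-ordered by an asymmetric relation is unique
theorem pvPerm_pairwise_eq (rules : List (Int × Int)) : ∀ (l1 l2 : List Int), l1.Perm l2 →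
    l1.Pairwise (pvS rules) → l2.Pairwise (pvS rules) → l1 = l2 := by
  intro l1
  induction l1 with
  | nil => intro l2 hperm _ _; simpa using hperm.nil_eq
  | cons a t1 ih =>
      intro l2 hperm hp1 hp2
      cases l2 with
      | nil => simpa using hperm.symm.nil_eq
      | cons b t2 =>
        rw [List.pairwise_cons] at hp1 hp2
        have hab : a = b := by
          by_contra hne
          have ha2 : a ∈ t2 := by
            have h0 : a ∈ b :: t2 := hperm.mem_iff.mp (by simp)
            rcases List.mem_cons.mp h0 with h1 | h1
            · exact absurd h1 hne
            · exact h1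
          have hb1 : b ∈ t1 := by
            have h0 : b ∈ a :: t1 := hperm.symm.mem_iff.mp (by simp)
            rcases List.mem_cons.mp h0 with h1 | h1
            · exact absurd h1.symm hne
            · exact h1
          exact pvS_asymm (hp1.1 b hb1) (hp2.1 a ha2)
        cases hab
        have := ih t2 (hperm.cons_inv) hp1.2 hp2.2
        rw [this]

-- ===== VERDICT (by name: the statement is the Claim_ definition above) =====
theorem fix_update_sequence_spec : Claim_equal_fix_update_sequence := by
  intro update rules _
  unfold Spec_fix_update_sequence fix_update_sequence fix_update_sequence_alt
  dsimp only
  rw [pvLoopA_eq_selSort update rules]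
  have hfold : update.foldl (fun res x => pvInsB (PySem.Set.ofList rules) res x) [] =
      update.foldl (fun res x => pvInsRec rules x res) [] := by
    congr 1
    funext res x
    exact pvInsB_eq_rec rules res x
  rw [hfold]
  have hpermA : (pvSelSort rules update).Perm update := pvSelSort_perm rules update
  have hpermB : (update.foldl (fun res x => pvInsRec rules x res) []).Perm update := by
    simpa using pvFoldIns_perm rules update []
  by_cases hex : ∃ l0 : List Int, l0.Perm update ∧ l0.Pairwise (pvS rules)
  · obtain ⟨l0, hl0p, hl0w⟩ := hex
    have htot : ∀ a b : Int, a ∈ l0 → b ∈ l0 → a ≠ b → pvS rules a b ∨ pvS rules b a :=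
      fun a b ha hb => pvTotal rules l0 hl0w a ha b hb
    have htr : ∀ a b c : Int, a ∈ l0 → b ∈ l0 → c ∈ l0 → pvS rules a b → pvS rules b c → pvS rules a c :=
      fun a b c ha hb hc => pvTrans rules l0 hl0w a ha b hb c hc
    have hndu : update.Nodup := hl0p.nodup_iff.mp (pvNodup rules l0 hl0w)
    have hA : (pvSelSort rules update).Pairwise (pvS rules) :=
      pvSelSort_pairwise rules (fun x => x ∈ l0) htot htr update
        (fun x hx => hl0p.mem_iff.mpr hx) hndu
    have hB : (update.foldl (fun res x => pvInsRec rules x res) []).Pairwise (pvS rules) :=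
      pvFoldIns_pairwise rules (fun x => x ∈ l0) htot htr update []
        (fun y hy => hl0p.mem_iff.mpr (by simpa using hy)) (by simpa using hndu) List.Pairwise.nil
    have hAB : pvSelSort rules update = update.foldl (fun res x => pvInsRec rules x res) [] :=
      pvPerm_pairwise_eq rules _ _ (hpermA.trans hpermB.symm) hA hB
    rw [if_pos ((pvCheckA_iff _ rules).mpr hA), if_pos ((pvValidB_iff rules _).mpr hB), hAB]
  · have hA' : ¬ (pvSelSort rules update).Pairwise (pvS rules) := fun h => hex ⟨_, hpermA, h⟩
    have hB' : ¬ (update.foldl (fun res x => pvInsRec rules x res) []).Pairwise (pvS rules) :=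
      fun h => hex ⟨_, hpermB, h⟩
    rw [if_neg (fun h => hA' ((pvCheckA_iff _ rules).mp h)),
        if_neg (fun h => hB' ((pvValidB_iff rules _).mp h))]
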